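-- pv_equiv track=rewrite | github.com/john-gaspar/signalforge | sentinelqa/dq/drift.py | _bucket_clusters
-- ===== SOURCE A (Python) =====
-- from typing import Any, Dict, List, Tuple
--
-- def _bucket_clusters(clusters: List[Dict[str, Any]]) -> Dict[str, int]:
--     buckets = {"1": 0, "2-3": 0, "4-7": 0, "8+": 0}
--     for c in clusters:
--         size = len(c.get("members", []))
--         if size <= 1:
--             buckets["1"] += 1
--         elif size <= 3:
--             buckets["2-3"] += 1
--         elif size <= 7:
--             buckets["4-7"] += 1
--         else:
--             buckets["8+"] += 1
--     return {k: v for k, v in buckets.items() if v > 0}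
-- ===== SOURCE B (Python) =====
-- def _bisect_right(a, x):
--     lo, hi = 0, len(a)
--     while lo < hi:
--         mid = (lo + hi) // 2
--         if x < a[mid]:
--             hi = mid
--         else:
--             lo = mid + 1
--     return lo
--
--
-- def _bucket_clusters(clusters):
--     sizes = sorted(len(c.get("members", [])) for c in clusters)
--     n1 = _bisect_right(sizes, 1)
--     n23 = _bisect_right(sizes, 3) - n1
--     n47 = _bisect_right(sizes, 7) - n1 - n23
--     n8 = len(sizes) - n1 - n23 - n47
--     return {k: v for k, v in (("1", n1), ("2-3", n23), ("4-7", n47), ("8+", n8)) if v > 0}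
-- ===== Notes on version B (the rewrite author's own statement) =====
-- stated objective: alternative
-- what changed: Replaced the per-element branch-chain counter loop with a sort of all member-count sizes followed by binary-search (bisect_right) range indexing on the bucket boundaries 1/3/7, assembling the fixed-order dict from the four range counts and dropping zeros.
import Mathlib
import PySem

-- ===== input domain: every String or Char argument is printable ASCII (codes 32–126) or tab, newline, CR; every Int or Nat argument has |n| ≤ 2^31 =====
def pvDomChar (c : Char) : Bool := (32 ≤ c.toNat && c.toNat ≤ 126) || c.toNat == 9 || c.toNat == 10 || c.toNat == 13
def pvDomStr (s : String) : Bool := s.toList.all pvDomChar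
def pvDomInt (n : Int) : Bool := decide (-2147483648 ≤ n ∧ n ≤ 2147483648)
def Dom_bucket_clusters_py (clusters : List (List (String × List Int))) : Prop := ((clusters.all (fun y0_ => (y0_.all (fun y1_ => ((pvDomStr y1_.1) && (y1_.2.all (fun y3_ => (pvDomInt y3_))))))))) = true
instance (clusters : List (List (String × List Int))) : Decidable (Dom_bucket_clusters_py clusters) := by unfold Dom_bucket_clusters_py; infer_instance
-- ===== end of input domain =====

-- B replaces A's branch-chain counter loop by sorting the sizes and binary-searching the
-- bucket boundaries (alternative decomposition, not claimed faster).

-- ===== PORT A =====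
-- len(c.get("members", [])) as an Int; both Pythons compute exactly this expression
def pvSize (c : List (String × List Int)) : Int :=
  ((PySem.Dict.mk c).getD "members" []).length

def bucket_clusters_py (clusters : List (List (String × List Int))) : List (String × Int) :=
  let buckets : PySem.Dict String Int := PySem.Dict.mk [("1", 0), ("2-3", 0), ("4-7", 0), ("8+", 0)]
  let buckets := clusters.foldl (fun b c =>
    let size := pvSize c
    if size ≤ 1 then b.insert "1" (b.getD "1" 0 + 1)
    else if size ≤ 3 then b.insert "2-3" (b.getD "2-3" 0 + 1)
    else if size ≤ 7 then b.insert "4-7" (b.getD "4-7" 0 + 1)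
    else b.insert "8+" (b.getD "8+" 0 + 1)) buckets
  buckets.items.filter (fun kv => decide (0 < kv.2))

-- ===== PORT B =====
-- hand-written bisect_right from Source B; lo/hi are nonnegative Python ints, so Nat with
-- Nat division is exact for (lo+hi)//2, and a[mid] is always in range, so getD is exact.
def pvBisectAux (a : List Int) (x : Int) (lo hi : Nat) : Nat :=
  if _h : lo < hi then
    let mid := (lo + hi) / 2
    if x < a.getD mid 0 then pvBisectAux a x lo mid
    else pvBisectAux a x (mid + 1) hi
  else lo
termination_by hi - lo
decreasing_by all_goals omega

def pvBisectRight (a : List Int) (x : Int) : Nat := pvBisectAux a x 0 a.length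

def bucket_clusters_py_alt (clusters : List (List (String × List Int))) : List (String × Int) :=
  let sizes : List Int := PySem.List.sorted (clusters.map (fun c => pvSize c)) (fun v => v) false
  let n1 : Int := pvBisectRight sizes 1
  let n23 : Int := (pvBisectRight sizes 3 : Int) - n1
  let n47 : Int := (pvBisectRight sizes 7 : Int) - n1 - n23
  let n8 : Int := (sizes.length : Int) - n1 - n23 - n47
  ([("1", n1), ("2-3", n23), ("4-7", n47), ("8+", n8)]).filter (fun kv => decide (0 < kv.2))

-- ===== PRECONDITION & SPEC =====
def Spec_bucket_clusters_py (clusters : List (List (String × List Int))) (out : List (String × Int)) : Prop := out = bucket_clusters_py_alt clusters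
instance (clusters : List (List (String × List Int))) (out : List (String × Int)) : Decidable (Spec_bucket_clusters_py clusters out) := by unfold Spec_bucket_clusters_py; infer_instance

-- ===== CLAIM (what is proved, stated in full; the proofs are below) =====
def Claim_equal_bucket_clusters_py : Prop := ∀ (clusters : List (List (String × List Int))), Dom_bucket_clusters_py clusters → Spec_bucket_clusters_py clusters (bucket_clusters_py clusters)

-- ===== LEMMAS AND PROOFS =====

-- bisect on a list split into (all ≤ x) ++ (all > x) returns the split point
theorem pvBisectAux_eq (x : Int) (u v : List Int)
    (hu : ∀ y ∈ u, y ≤ x) (hv : ∀ y ∈ v, x < y) :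
    ∀ n lo hi, hi - lo ≤ n → lo ≤ u.length → u.length ≤ hi → hi ≤ u.length + v.length →
      pvBisectAux (u ++ v) x lo hi = u.length := by
  intro n
  induction n with
  | zero =>
    intro lo hi h1 h2 h3 h4
    rw [pvBisectAux]
    have : ¬ lo < hi := by omega
    simp [this]; omega
  | succ n ih =>
    intro lo hi h1 h2 h3 h4
    rw [pvBisectAux]
    by_cases hlh : lo < hi
    · simp only [hlh, dif_pos]
      set mid := (lo + hi) / 2 with hmid
      have hm1 : lo ≤ mid := by omega
      have hm2 : mid < hi := by omega
      by_cases hcase : mid < u.length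
      · have hget : (u ++ v).getD mid 0 = u.getD mid 0 := List.getD_append _ _ _ _ hcase
        have hmem : u.getD mid 0 ∈ u := by
          rw [List.getD_eq_getElem _ _ hcase]; exact List.getElem_mem _
        have hnx : ¬ x < (u ++ v).getD mid 0 := by
          rw [hget]; exact not_lt.mpr (hu _ hmem)
        rw [if_neg hnx]
        exact ih (mid + 1) hi (by omega) (by omega) h3 h4
      · have hlen : u.length ≤ mid := by omega
        have hget : (u ++ v).getD mid 0 = v.getD (mid - u.length) 0 :=
          List.getD_append_right _ _ _ _ hlen
        have hvlt : mid - u.length < v.length := by omega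
        have hmem : v.getD (mid - u.length) 0 ∈ v := by
          rw [List.getD_eq_getElem _ _ hvlt]; exact List.getElem_mem _
        have hx : x < (u ++ v).getD mid 0 := by rw [hget]; exact hv _ hmem
        rw [if_pos hx]
        exact ih lo mid (by omega) h2 (by omega) (by omega)
    · simp [hlh]; omega

-- in a ≤-sorted list, everything in the dropWhile part exceeds x
theorem dropWhile_gt (x : Int) :
    ∀ (s : List Int), s.Pairwise (· ≤ ·) →
      ∀ y ∈ s.dropWhile (fun v => decide (v ≤ x)), x < y := by
  intro s
  induction s with
  | nil => intro _ y hy; simp [List.dropWhile] at hy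
  | cons a t ih =>
    intro hp y hy
    rcases List.pairwise_cons.mp hp with ⟨ha, ht⟩
    by_cases hax : a ≤ x
    · rw [List.dropWhile_cons_of_pos (by simpa using hax)] at hy
      exact ih ht y hy
    · rw [List.dropWhile_cons_of_neg (by simpa using hax)] at hy
      rcases List.mem_cons.mp hy with rfl | hy
      · omega
      · have := ha y hy; omega

-- on a ≤-sorted list, the hand-written bisect_right counts the elements ≤ x
theorem pvBisectRight_countP (s : List Int) (hs : s.Pairwise (· ≤ ·)) (x : Int) :
    pvBisectRight s x = s.countP (fun v => decide (v ≤ x)) := by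
  have hsplit : s.takeWhile (fun v => decide (v ≤ x)) ++ s.dropWhile (fun v => decide (v ≤ x)) = s :=
    List.takeWhile_append_dropWhile
  have hu : ∀ y ∈ s.takeWhile (fun v => decide (v ≤ x)), y ≤ x := by
    intro y hmem; simpa using List.mem_takeWhile_imp hmem
  have hv : ∀ y ∈ s.dropWhile (fun v => decide (v ≤ x)), x < y := dropWhile_gt x s hs
  have hl : (s.takeWhile (fun v => decide (v ≤ x)) ++ s.dropWhile (fun v => decide (v ≤ x))).length
      = (s.takeWhile (fun v => decide (v ≤ x))).length + (s.dropWhile (fun v => decide (v ≤ x))).length :=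
    List.length_append
  have key := pvBisectAux_eq x _ _ hu hv
    ((s.takeWhile (fun v => decide (v ≤ x)) ++ s.dropWhile (fun v => decide (v ≤ x))).length) 0
    ((s.takeWhile (fun v => decide (v ≤ x)) ++ s.dropWhile (fun v => decide (v ≤ x))).length)
    (by omega) (by omega) (by omega) (by omega)
  rw [hsplit] at key
  have h1 : (s.takeWhile (fun v => decide (v ≤ x))).countP (fun v => decide (v ≤ x))
      = (s.takeWhile (fun v => decide (v ≤ x))).length :=
    List.countP_eq_length.mpr (fun y hy => by simpa using hu y hy)
  have h2 : (s.dropWhile (fun v => decide (v ≤ x))).countP (fun v => decide (v ≤ x)) = 0 :=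
    List.countP_eq_zero.mpr (fun y hy => by have := hv y hy; simpa using (by omega : ¬ y ≤ x))
  have hcount : s.countP (fun v => decide (v ≤ x))
      = (s.takeWhile (fun v => decide (v ≤ x))).length := by
    conv_lhs => rw [← hsplit]
    rw [List.countP_append, h1, h2]
    omega
  rw [pvBisectRight, key, hcount]

-- counting ≤ b splits at an inner boundary a
theorem countP_split (a b : Int) (hab : a ≤ b) :
    ∀ l : List Int, l.countP (fun v => decide (v ≤ b)) =
      l.countP (fun v => decide (v ≤ a)) + l.countP (fun v => decide (a < v) && decide (v ≤ b)) := by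
  intro l
  induction l with
  | nil => simp
  | cons y t ih =>
    simp only [List.countP_cons, ih]
    by_cases h1 : y ≤ a <;> by_cases h2 : y ≤ b <;> by_cases h3 : a < y <;>
      simp [h1, h2, h3] <;> omega

-- A's fold with the literal four-key dict, characterised by countP
theorem foldA (cs : List (List (String × List Int))) :
    ∀ n1 n23 n47 n8 : Int,
      cs.foldl (fun b c =>
        let size := pvSize c
        if size ≤ 1 then b.insert "1" (b.getD "1" 0 + 1)
        else if size ≤ 3 then b.insert "2-3" (b.getD "2-3" 0 + 1)
        else if size ≤ 7 then b.insert "4-7" (b.getD "4-7" 0 + 1)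
        else b.insert "8+" (b.getD "8+" 0 + 1))
        (PySem.Dict.mk [("1", n1), ("2-3", n23), ("4-7", n47), ("8+", n8)]) =
      PySem.Dict.mk [("1", n1 + cs.countP (fun c => decide (pvSize c ≤ 1))),
        ("2-3", n23 + cs.countP (fun c => decide (1 < pvSize c) && decide (pvSize c ≤ 3))),
        ("4-7", n47 + cs.countP (fun c => decide (3 < pvSize c) && decide (pvSize c ≤ 7))),
        ("8+", n8 + cs.countP (fun c => decide (7 < pvSize c)))] := by
  induction cs with
  | nil => simp
  | cons c t ih =>
    intro n1 n23 n47 n8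
    rw [List.foldl_cons]
    by_cases h1 : pvSize c ≤ 1
    · have hstep : (let size := pvSize c
          if size ≤ 1 then (PySem.Dict.mk [("1", n1), ("2-3", n23), ("4-7", n47), ("8+", n8)]).insert "1" ((PySem.Dict.mk [("1", n1), ("2-3", n23), ("4-7", n47), ("8+", n8)]).getD "1" 0 + 1)
          else if size ≤ 3 then (PySem.Dict.mk [("1", n1), ("2-3", n23), ("4-7", n47), ("8+", n8)]).insert "2-3" ((PySem.Dict.mk [("1", n1), ("2-3", n23), ("4-7", n47), ("8+", n8)]).getD "2-3" 0 + 1)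
          else if size ≤ 7 then (PySem.Dict.mk [("1", n1), ("2-3", n23), ("4-7", n47), ("8+", n8)]).insert "4-7" ((PySem.Dict.mk [("1", n1), ("2-3", n23), ("4-7", n47), ("8+", n8)]).getD "4-7" 0 + 1)
          else (PySem.Dict.mk [("1", n1), ("2-3", n23), ("4-7", n47), ("8+", n8)]).insert "8+" ((PySem.Dict.mk [("1", n1), ("2-3", n23), ("4-7", n47), ("8+", n8)]).getD "8+" 0 + 1))
          = PySem.Dict.mk [("1", n1 + 1), ("2-3", n23), ("4-7", n47), ("8+", n8)] := by
        simp [h1, PySem.Dict.insert, PySem.Dict.getD, PySem.Dict.get?, PySem.Dict.contains]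
      rw [hstep, ih]
      have e2 : ¬ (1 < pvSize c) := by omega
      simp only [List.countP_cons]
      simp [h1, e2]
      omega
    · by_cases h2 : pvSize c ≤ 3
      · have hstep : (let size := pvSize c
          if size ≤ 1 then (PySem.Dict.mk [("1", n1), ("2-3", n23), ("4-7", n47), ("8+", n8)]).insert "1" ((PySem.Dict.mk [("1", n1), ("2-3", n23), ("4-7", n47), ("8+", n8)]).getD "1" 0 + 1)
          else if size ≤ 3 then (PySem.Dict.mk [("1", n1), ("2-3", n23), ("4-7", n47), ("8+", n8)]).insert "2-3" ((PySem.Dict.mk [("1", n1), ("2-3", n23), ("4-7", n47), ("8+", n8)]).getD "2-3" 0 + 1)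
          else if size ≤ 7 then (PySem.Dict.mk [("1", n1), ("2-3", n23), ("4-7", n47), ("8+", n8)]).insert "4-7" ((PySem.Dict.mk [("1", n1), ("2-3", n23), ("4-7", n47), ("8+", n8)]).getD "4-7" 0 + 1)
          else (PySem.Dict.mk [("1", n1), ("2-3", n23), ("4-7", n47), ("8+", n8)]).insert "8+" ((PySem.Dict.mk [("1", n1), ("2-3", n23), ("4-7", n47), ("8+", n8)]).getD "8+" 0 + 1))
            = PySem.Dict.mk [("1", n1), ("2-3", n23 + 1), ("4-7", n47), ("8+", n8)] := by
          simp [h1, h2, PySem.Dict.insert, PySem.Dict.getD, PySem.Dict.get?, PySem.Dict.contains]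
        rw [hstep, ih]
        have e1 : 1 < pvSize c := by omega
        have e3 : ¬ (3 < pvSize c) := by omega
        simp only [List.countP_cons]
        simp [h1, h2, e1, e3]
        omega
      · by_cases h3 : pvSize c ≤ 7
        · have hstep : (let size := pvSize c
          if size ≤ 1 then (PySem.Dict.mk [("1", n1), ("2-3", n23), ("4-7", n47), ("8+", n8)]).insert "1" ((PySem.Dict.mk [("1", n1), ("2-3", n23), ("4-7", n47), ("8+", n8)]).getD "1" 0 + 1)
          else if size ≤ 3 then (PySem.Dict.mk [("1", n1), ("2-3", n23), ("4-7", n47), ("8+", n8)]).insert "2-3" ((PySem.Dict.mk [("1", n1), ("2-3", n23), ("4-7", n47), ("8+", n8)]).getD "2-3" 0 + 1)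
          else if size ≤ 7 then (PySem.Dict.mk [("1", n1), ("2-3", n23), ("4-7", n47), ("8+", n8)]).insert "4-7" ((PySem.Dict.mk [("1", n1), ("2-3", n23), ("4-7", n47), ("8+", n8)]).getD "4-7" 0 + 1)
          else (PySem.Dict.mk [("1", n1), ("2-3", n23), ("4-7", n47), ("8+", n8)]).insert "8+" ((PySem.Dict.mk [("1", n1), ("2-3", n23), ("4-7", n47), ("8+", n8)]).getD "8+" 0 + 1))
              = PySem.Dict.mk [("1", n1), ("2-3", n23), ("4-7", n47 + 1), ("8+", n8)] := by
            simp [h1, h2, h3, PySem.Dict.insert, PySem.Dict.getD, PySem.Dict.get?, PySem.Dict.contains]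
          rw [hstep, ih]
          have e3 : 3 < pvSize c := by omega
          have e7 : ¬ (7 < pvSize c) := by omega
          simp only [List.countP_cons]
          simp [h1, h2, h3, e3, e7]
          omega
        · have hstep : (let size := pvSize c
          if size ≤ 1 then (PySem.Dict.mk [("1", n1), ("2-3", n23), ("4-7", n47), ("8+", n8)]).insert "1" ((PySem.Dict.mk [("1", n1), ("2-3", n23), ("4-7", n47), ("8+", n8)]).getD "1" 0 + 1)
          else if size ≤ 3 then (PySem.Dict.mk [("1", n1), ("2-3", n23), ("4-7", n47), ("8+", n8)]).insert "2-3" ((PySem.Dict.mk [("1", n1), ("2-3", n23), ("4-7", n47), ("8+", n8)]).getD "2-3" 0 + 1)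
          else if size ≤ 7 then (PySem.Dict.mk [("1", n1), ("2-3", n23), ("4-7", n47), ("8+", n8)]).insert "4-7" ((PySem.Dict.mk [("1", n1), ("2-3", n23), ("4-7", n47), ("8+", n8)]).getD "4-7" 0 + 1)
          else (PySem.Dict.mk [("1", n1), ("2-3", n23), ("4-7", n47), ("8+", n8)]).insert "8+" ((PySem.Dict.mk [("1", n1), ("2-3", n23), ("4-7", n47), ("8+", n8)]).getD "8+" 0 + 1))
              = PySem.Dict.mk [("1", n1), ("2-3", n23), ("4-7", n47), ("8+", n8 + 1)] := by
            simp [h1, h2, h3, PySem.Dict.insert, PySem.Dict.getD, PySem.Dict.get?, PySem.Dict.contains]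
          rw [hstep, ih]
          have e7 : 7 < pvSize c := by omega
          simp only [List.countP_cons]
          simp [h1, h2, h3, e7]
          omega

-- ===== VERDICT (by name: the statement is the Claim_ definition above) =====
theorem bucket_clusters_py_spec : Claim_equal_bucket_clusters_py := by
  intro clusters _
  show bucket_clusters_py clusters = bucket_clusters_py_alt clusters
  have hperm : (PySem.List.sorted (clusters.map (fun c => pvSize c)) (fun v => v) false).Perm
      (clusters.map (fun c => pvSize c)) := PySem.List.sorted_perm _ _ _
  have hpw : (PySem.List.sorted (clusters.map (fun c => pvSize c)) (fun v => v) false).Pairwise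
      (· ≤ ·) := by
    have := PySem.List.sorted_pairwise (xs := clusters.map (fun c => pvSize c))
      (key := fun v => v)
    simpa using this
  have hb : ∀ x : Int, pvBisectRight (PySem.List.sorted (clusters.map (fun c => pvSize c)) (fun v => v) false) x
      = clusters.countP (fun c => decide (pvSize c ≤ x)) := by
    intro x
    rw [pvBisectRight_countP _ hpw x, hperm.countP_eq, List.countP_map]; rfl
  have hlen : (PySem.List.sorted (clusters.map (fun c => pvSize c)) (fun v => v) false).length
      = clusters.length := by
    rw [hperm.length_eq, List.length_map]
  have hsplit13 := countP_split 1 3 (by omega) (clusters.map (fun c => pvSize c))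
  have hsplit37 := countP_split 3 7 (by omega) (clusters.map (fun c => pvSize c))
  rw [List.countP_map, List.countP_map, List.countP_map] at hsplit13 hsplit37
  simp only [Function.comp_def] at hsplit13 hsplit37
  have hsplit7 : clusters.countP (fun c => decide (pvSize c ≤ 7))
      + clusters.countP (fun c => decide (7 < pvSize c)) = clusters.length := by
    have h := List.length_eq_countP_add_countP (p := fun c => decide (pvSize c ≤ 7)) (l := clusters)
    have h2 : clusters.countP (fun a => decide ¬(decide (pvSize a ≤ 7) = true))
        = clusters.countP (fun c => decide (7 < pvSize c)) := by
      apply List.countP_congr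
      intro c _
      by_cases hc : pvSize c ≤ 7
      · simp [hc]
      · simp [hc]
        omega
    rw [h2] at h
    omega
  simp only [bucket_clusters_py, bucket_clusters_py_alt]
  rw [foldA clusters 0 0 0 0]
  simp only [hb, hlen]
  congr 1
  simp only [List.cons.injEq, Prod.mk.injEq, zero_add, true_and, and_true]
  omega
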